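-- pv_equiv track=rewrite | github.com/DavidV-coder/prompt-generator | backend/app/services/ai_service.py | parse_prompts
-- ===== SOURCE A (Python) =====
-- def parse_prompts(content: str) -> list[str]:
--     """Parse prompts from AI response."""
--     prompts = [
--         line.strip()
--         for line in content.split("\n")
--         if line.strip() and not line.strip().startswith(("#", "-", "*", "•"))
--     ]
--
--     cleaned_prompts = []
--     for prompt in prompts:
--         if len(prompt) > 2 and prompt[0].isdigit() and prompt[1] in ".):":
--             prompt = prompt[2:].strip()
--         elif len(prompt) > 3 and prompt[:2].isdigit() and prompt[2] in ".):":
--             prompt = prompt[3:].strip()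
--         if prompt:
--             cleaned_prompts.append(prompt)
--
--     return cleaned_prompts[:5] if cleaned_prompts else ["Не удалось сгенерировать промпты. Попробуйте ещё раз."]
-- ===== SOURCE B (Python) =====
-- def parse_prompts(content: str) -> list[str]:
--     """Parse prompts from AI response (recursive, stops once 5 prompts are found)."""
--
--     def clean(line):
--         line = line.strip()
--         if not line or line[0] in "#-*\u2022":
--             return None
--         d = 0
--         while d < len(line) and line[d].isdigit():
--             d += 1
--         if 1 <= d <= 2 and len(line) > d + 1 and line[d] in ".):":
--             line = line[d + 1:].strip()
--         return line if line else None
--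
--     def go(lines, need):
--         if need == 0 or not lines:
--             return []
--         p = clean(lines[0])
--         if p is None:
--             return go(lines[1:], need)
--         return [p] + go(lines[1:], need - 1)
--
--     out = go(content.split("\n"), 5)
--     return out if out else ["Не удалось сгенерировать промпты. Попробуйте ещё раз."]
-- ===== Notes on version B (the rewrite author's own statement) =====
-- stated objective: alternative
-- what changed: B is a recursive generator over the lines with a need-countdown that stops at 5, classifies each line with a single clean() helper that detects the bullet markers by first-character membership and strips the numeric prefix by measuring the leading digit run (one unified branch) instead of A's two staged passes, duplicated branch conditions and final [:5] slice.
import Mathlib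
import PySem

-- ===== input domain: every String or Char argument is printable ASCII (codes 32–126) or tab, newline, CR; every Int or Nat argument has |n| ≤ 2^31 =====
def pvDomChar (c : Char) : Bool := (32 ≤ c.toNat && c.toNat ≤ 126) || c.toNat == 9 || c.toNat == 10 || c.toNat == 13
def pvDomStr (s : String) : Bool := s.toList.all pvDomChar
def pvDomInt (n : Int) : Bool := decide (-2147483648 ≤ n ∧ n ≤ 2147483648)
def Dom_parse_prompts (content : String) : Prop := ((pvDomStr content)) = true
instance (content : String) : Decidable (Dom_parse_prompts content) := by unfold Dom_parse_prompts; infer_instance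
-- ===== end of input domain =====

set_option maxHeartbeats 800000


-- B re-decomposes A: a recursive traversal of the lines with a need-countdown
-- (stops at 5) and one clean() helper that strips the numeric prefix by measuring
-- the leading digit run, instead of A's two staged passes and final slice
-- (objective: alternative).

-- ===== PORT A =====

-- c in ".):"  (membership of one char in a 3-char string)
def pvPunct (c : Char) : Bool := c == '.' || c == ')' || c == ':'

-- line.strip().startswith(("#", "-", "*", "•"))
def pvStarts (s : List Char) : Bool :=
  PySem.Chars.startswith s ['#'] || PySem.Chars.startswith s ['-'] ||
  PySem.Chars.startswith s ['*'] || PySem.Chars.startswith s ['•']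

-- A's numeric-prefix stripping applied to one (already stripped) prompt.
-- prompt[0]/prompt[1]/prompt[2] are in range under the length guards, so the
-- Option from pyGet? is eliminated with a dead `false` default.
def pvCleanNum (p : List Char) : List Char :=
  if decide (p.length > 2) && (PySem.List.pyGet? p 0).elim false PySem.Chars.isdigit
      && (PySem.List.pyGet? p 1).elim false pvPunct then
    PySem.Chars.strip (PySem.List.slice p (some 2) none)
  else if decide (p.length > 3) && PySem.Chars.strIsdigit (PySem.List.slice p none (some 2))
      && (PySem.List.pyGet? p 2).elim false pvPunct then
    PySem.Chars.strip (PySem.List.slice p (some 3) none)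
  else p

def pvFallback : String := "Не удалось сгенерировать промпты. Попробуйте ещё раз."

def parse_prompts (content : String) : List String :=
  -- prompts = [line.strip() for line in content.split("\n") if line.strip() and not …startswith…]
  let prompts : List (List Char) :=
    (PySem.Chars.splitOn content.toList ['\n']).filterMap (fun line =>
      let s := PySem.Chars.strip line
      if !s.isEmpty && !pvStarts s then some s else none)
  -- cleaned_prompts loop
  let cleaned : List (List Char) :=
    prompts.foldl (fun acc prompt =>
      let p := pvCleanNum prompt
      if !p.isEmpty then acc ++ [p] else acc) []
  -- return cleaned_prompts[:5] if cleaned_prompts else [fallback]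
  if !cleaned.isEmpty then (PySem.List.slice cleaned none (some 5)).map String.ofList
  else [pvFallback]

-- ===== PORT B =====

-- line[0] in "#-*•" for a single char = membership among the four marker chars
def pvMarker (c : Char) : Bool := c == '#' || c == '-' || c == '*' || c == '•'

-- Source B's clean(line): strip; None on empty/marker lines; strip a numeric prefix
-- whose leading digit run (the while loop, here the length of takeWhile) is 1 or 2
def pvClean (line : List Char) : Option (List Char) :=
  let s := PySem.Chars.strip line
  if s.isEmpty then none
  else if (PySem.List.pyGet? s 0).elim false pvMarker then none
  else
    let d : Nat := (s.takeWhile PySem.Chars.isdigit).length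
    let s' :=
      if decide (1 ≤ d) && decide (d ≤ 2) && decide (s.length > d + 1)
          && (PySem.List.pyGet? s (d : Int)).elim false pvPunct then
        PySem.Chars.strip (PySem.List.slice s (some ((d : Int) + 1)) none)
      else s
    if s'.isEmpty then none else some s'

-- Source B's go(lines, need): recursive, cons-building, stops when need hits 0
def pvGo : List (List Char) → Nat → List (List Char)
  | _, 0 => []
  | [], _ + 1 => []
  | l :: rest, n + 1 =>
    match pvClean l with
    | none => pvGo rest (n + 1)
    | some p => [p] ++ pvGo rest n

def parse_prompts_alt (content : String) : List String :=
  let out := pvGo (PySem.Chars.splitOn content.toList ['\n']) 5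
  if out.isEmpty then [pvFallback] else out.map String.ofList

-- ===== PRECONDITION & SPEC =====
def Spec_parse_prompts (content : String) (out : List String) : Prop := out = parse_prompts_alt content
instance (content : String) (out : List String) : Decidable (Spec_parse_prompts content out) := by unfold Spec_parse_prompts; infer_instance

-- ===== CLAIM (what is proved, stated in full; the proofs are below) =====
def Claim_equal_parse_prompts : Prop := ∀ (content : String), Dom_parse_prompts content → Spec_parse_prompts content (parse_prompts content)

-- ===== LEMMAS AND PROOFS =====

-- what one line contributes in A: strip, skip empty/marker lines, clean, keep if non-empty
def pvStep (line : List Char) : Option (List Char) :=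
  let s := PySem.Chars.strip line
  if !s.isEmpty && !pvStarts s then
    let p := pvCleanNum s
    if !p.isEmpty then some p else none
  else none

def pvAll (lines : List (List Char)) : List (List Char) := lines.filterMap pvStep

theorem pvAll_cons_none {l : List Char} {rest : List (List Char)} (h : pvStep l = none) :
    pvAll (l :: rest) = pvAll rest := by
  simp [pvAll, h]

theorem pvAll_cons_some {l p : List Char} {rest : List (List Char)} (h : pvStep l = some p) :
    pvAll (l :: rest) = p :: pvAll rest := by
  simp [pvAll, h]

-- A's two passes compute pvAll
theorem pvA_eq (lines : List (List Char)) (acc : List (List Char)) :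
    ((lines.filterMap (fun line =>
        let s := PySem.Chars.strip line
        if !s.isEmpty && !pvStarts s then some s else none)).foldl
      (fun acc prompt =>
        let p := pvCleanNum prompt
        if !p.isEmpty then acc ++ [p] else acc) acc) = acc ++ pvAll lines := by
  induction lines generalizing acc with
  | nil => simp [pvAll]
  | cons l rest ih =>
    by_cases hc : (!(PySem.Chars.strip l).isEmpty && !pvStarts (PySem.Chars.strip l)) = true
    · rw [List.filterMap_cons_some (by dsimp only; rw [if_pos hc]), List.foldl_cons]
      dsimp only
      by_cases hp : (!(pvCleanNum (PySem.Chars.strip l)).isEmpty) = true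
      · rw [if_pos hp, ih, pvAll_cons_some (by simp only [pvStep]; rw [if_pos hc, if_pos hp])]
        simp
      · rw [if_neg hp, ih, pvAll_cons_none (by simp only [pvStep]; rw [if_pos hc, if_neg hp])]
    · rw [List.filterMap_cons_none (by dsimp only; rw [if_neg hc]), ih,
         pvAll_cons_none (by simp only [pvStep]; rw [if_neg hc])]

-- a punctuation char is not a digit
theorem pvPunct_not_digit {c : Char} (h : pvPunct c = true) : PySem.Chars.isdigit c = false := by
  rcases Bool.or_eq_true_iff.mp h with h' | h'
  · rcases Bool.or_eq_true_iff.mp h' with h'' | h'' <;>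
      · rw [show c = _ from beq_iff_eq.mp h'']; decide
  · rw [show c = _ from beq_iff_eq.mp h']; decide

-- a digit is not one of the three punctuation chars
theorem not_punct_of_digit {c : Char} (h : PySem.Chars.isdigit c = true) : pvPunct c = false := by
  cases hp : pvPunct c
  · rfl
  · rw [pvPunct_not_digit hp] at h; exact absurd h (by simp)

-- for a nonempty stripped line, B's first-char membership = A's startswith test
theorem pvMarker_eq_starts (c : Char) (t : List Char) :
    pvMarker c = pvStarts (c :: t) := by
  simp [pvMarker, pvStarts, PySem.Chars.startswith, List.isPrefixOf, Bool.beq_comm]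

-- B's digit-run strip equals A's two-branch strip on every string
theorem pvNum_eq (s : List Char) :
    (if decide (1 ≤ (s.takeWhile PySem.Chars.isdigit).length)
        && decide ((s.takeWhile PySem.Chars.isdigit).length ≤ 2)
        && decide (s.length > (s.takeWhile PySem.Chars.isdigit).length + 1)
        && (PySem.List.pyGet? s ((s.takeWhile PySem.Chars.isdigit).length : Int)).elim false pvPunct then
      PySem.Chars.strip (PySem.List.slice s (some (((s.takeWhile PySem.Chars.isdigit).length : Int) + 1)) none)
    else s) = pvCleanNum s := by
  unfold pvCleanNum
  match s with
  | [] => norm_num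
  | [a] =>
    by_cases ha : PySem.Chars.isdigit a = true <;>
      · rw [if_neg (by simp [ha]), if_neg (by simp), if_neg (by simp)]
  | a :: b :: t =>
    by_cases ha : PySem.Chars.isdigit a = true
    · by_cases hb : PySem.Chars.isdigit b = true
      · have hpb := not_punct_of_digit hb
        match t with
        | [] =>
          rw [if_neg (by simp [ha, hb]), if_neg (by simp),
              if_neg (by simp)]
        | c :: t' =>
          by_cases hc : PySem.Chars.isdigit c = true
          · have hpc := not_punct_of_digit hc
            have hd : ¬((t'.takeWhile PySem.Chars.isdigit).length + 1 + 1 + 1 ≤ 2) := by omega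
            rw [if_neg (by simp [ha, hb, hc, hd]),
                if_neg (by simp [PySem.List.pyGet?_ofNat', hpb]),
                if_neg (by simp [PySem.List.pyGet?_ofNat', hpc])]
          · match t' with
            | [] =>
              rw [if_neg (by simp [ha, hb, hc]),
                  if_neg (by simp [hpb]), if_neg (by simp)]
            | y :: t'' =>
              by_cases hpc : pvPunct c = true
              · rw [if_pos (by simp [ha, hb, hc, PySem.List.pyGet?_ofNat', hpc]),
                    if_neg (by simp [PySem.List.pyGet?_ofNat', hpb]),
                    if_pos (by simp [PySem.Chars.strIsdigit, pysem, ha, hb, PySem.List.pyGet?_ofNat', hpc])]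
                norm_num [List.takeWhile_cons, ha, hb, hc]
              · rw [if_neg (by simp [ha, hb, hc, PySem.List.pyGet?_ofNat', hpc]),
                    if_neg (by simp [PySem.List.pyGet?_ofNat', hpb]),
                    if_neg (by simp [PySem.List.pyGet?_ofNat', hpc])]
      · have hbt : (List.takeWhile PySem.Chars.isdigit (a :: b :: t)) = [a] := by
          simp [ha, hb]
        match t with
        | [] =>
          rw [if_neg (by simp [hbt]), if_neg (by simp),
              if_neg (by simp [pysem, PySem.Chars.strIsdigit, hb])]
        | c :: t' =>
          by_cases hpb : pvPunct b = true
          · rw [if_pos (by simp [hbt, PySem.List.pyGet?_ofNat', hpb]),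
                if_pos (by simp [PySem.List.pyGet?_ofNat', ha, hpb])]
            norm_num [hbt]
          · rw [if_neg (by simp [hbt, PySem.List.pyGet?_ofNat', hpb]),
                if_neg (by simp [PySem.List.pyGet?_ofNat', hpb]),
                if_neg (by simp [pysem, PySem.Chars.strIsdigit, hb])]
    · rw [if_neg (by simp [ha]),
          if_neg (by simp [ha]),
          if_neg (by simp [pysem, PySem.Chars.strIsdigit, ha])]

-- B's clean = A's per-line step
theorem pvClean_eq_pvStep (l : List Char) : pvClean l = pvStep l := by
  unfold pvClean pvStep
  cases hs : PySem.Chars.strip l with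
  | nil => rfl
  | cons c t =>
    simp only [List.isEmpty_cons, Bool.false_eq_true, if_false, PySem.List.pyGet?_zero_cons,
      Option.elim_some, pvMarker_eq_starts c t, Bool.not_false, Bool.true_and]
    by_cases hst : pvStarts (c :: t) = true
    · simp only [hst, reduceIte, Bool.not_true, Bool.false_eq_true, if_false]
    · simp only [hst, Bool.not_false, reduceIte, Bool.false_eq_true, if_true]
      rw [pvNum_eq (c :: t)]
      cases _h : (pvCleanNum (c :: t)).isEmpty <;> simp

-- B's recursion computes take n of pvAll
theorem pvGo_eq (lines : List (List Char)) (n : Nat) :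
    pvGo lines n = (pvAll lines).take n := by
  induction lines generalizing n with
  | nil => cases n <;> simp [pvGo, pvAll]
  | cons l rest ih =>
    cases n with
    | zero => simp [pvGo]
    | succ n =>
      rw [pvGo]
      cases hc : pvClean l with
      | none => rw [ih, pvAll_cons_none (pvClean_eq_pvStep l ▸ hc)]
      | some p => simp [pvAll_cons_some (pvClean_eq_pvStep l ▸ hc), ih]

-- ===== VERDICT (by name: the statement is the Claim_ definition above) =====
theorem parse_prompts_spec : Claim_equal_parse_prompts := by
  intro content _
  unfold Spec_parse_prompts parse_prompts parse_prompts_alt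
  dsimp only
  rw [pvGo_eq, pvA_eq _ []]
  simp only [List.nil_append]
  rw [show ((5 : Int) = ((5 : Nat) : Int)) from rfl, PySem.List.slice_to_natCast]
  by_cases h : (pvAll (PySem.Chars.splitOn content.toList ['\n'])).isEmpty
  · simp_all
  · have h2 : ¬ ((pvAll (PySem.Chars.splitOn content.toList ['\n'])).take 5).isEmpty = true := by
      simp_all [List.isEmpty_iff]
    simp [h, h2]
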